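-- pv_equiv track=rewrite | github.com/emma2tony07-spec/Alethea_miner | app.py | calculate_block_reward
-- ===== SOURCE A (Python) =====
-- INITIAL_REWARD     = 10            # ALE rewarded per block initially
--
-- HALVING_INTERVAL   = 210_000       # blocks between reward halvings
--
-- def calculate_block_reward(block_index: int) -> float:
--     """
--     Returns the mining reward for the given block index, applying halvings.
--     Reward starts at INITIAL_REWARD and halves every HALVING_INTERVAL blocks.
--     Returns 0 once the reward would fall below 1 ALE.
--     """
--     halvings = block_index // HALVING_INTERVAL
--     reward   = INITIAL_REWARD
--     for _ in range(halvings):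
--         reward //= 2   # integer halving
--         if reward < 1:
--             return 0
--     return reward
-- ===== SOURCE B (Python) =====
-- INITIAL_REWARD     = 10
-- HALVING_INTERVAL   = 210_000
--
-- def calculate_block_reward(block_index: int) -> float:
--     """Closed form: h halvings of 10 by integer division equal 10 // 2**h."""
--     halvings = block_index // HALVING_INTERVAL
--     if halvings <= 0:
--         return INITIAL_REWARD
--     return INITIAL_REWARD // (2 ** halvings)
-- ===== Notes on version B (the rewrite author's own statement) =====
-- stated objective: simpler
-- what changed: Replaced the halving loop with early exit by the closed form 10 // 2**halvings (which is 0 once halvings >= 4, matching the loop's early return).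
import Mathlib
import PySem

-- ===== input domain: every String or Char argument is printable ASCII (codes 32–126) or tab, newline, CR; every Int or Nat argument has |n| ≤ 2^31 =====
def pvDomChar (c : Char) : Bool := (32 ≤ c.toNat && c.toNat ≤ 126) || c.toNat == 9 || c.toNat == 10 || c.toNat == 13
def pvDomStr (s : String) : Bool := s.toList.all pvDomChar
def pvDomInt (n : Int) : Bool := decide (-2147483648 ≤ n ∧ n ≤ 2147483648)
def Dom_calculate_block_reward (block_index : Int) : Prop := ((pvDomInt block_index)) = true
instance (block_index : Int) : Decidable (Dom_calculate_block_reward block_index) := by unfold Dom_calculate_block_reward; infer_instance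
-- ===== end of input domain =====

-- B replaces A's halving loop by the closed form 10 // 2**halvings (simpler; same values).


-- ===== PORT A =====
-- the 'for _ in range(halvings)' loop: n iterations with early return 0
def pvLoopA : Nat → Int → Int
  | 0, reward => reward
  | n + 1, reward =>
      let reward' := PySem.Int.floordiv reward 2
      if reward' < 1 then 0 else pvLoopA n reward'

def calculate_block_reward (block_index : Int) : Int :=
  let halvings := PySem.Int.floordiv block_index 210000
  pvLoopA halvings.toNat 10

-- ===== PORT B =====
def calculate_block_reward_alt (block_index : Int) : Int :=
  let halvings := PySem.Int.floordiv block_index 210000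
  if halvings ≤ 0 then 10
  else PySem.Int.floordiv 10 (2 ^ halvings.toNat)

-- ===== PRECONDITION & SPEC =====
def Spec_calculate_block_reward (block_index : Int) (out : Int) : Prop := out = calculate_block_reward_alt block_index
instance (block_index : Int) (out : Int) : Decidable (Spec_calculate_block_reward block_index out) := by unfold Spec_calculate_block_reward; infer_instance

-- ===== CLAIM (what is proved, stated in full; the proofs are below) =====
def Claim_equal_calculate_block_reward : Prop := ∀ (block_index : Int), Dom_calculate_block_reward block_index → Spec_calculate_block_reward block_index (calculate_block_reward block_index)

-- ===== LEMMAS AND PROOFS =====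

-- after 4 halvings the running reward is 0, so the loop's early return fires regardless of n
theorem pvLoopA_add_four (n : Nat) : pvLoopA (n + 4) 10 = 0 := by
  simp [pvLoopA, PySem.Int.floordiv]

theorem pv_div_big (n : Nat) (hn : 4 ≤ n) : PySem.Int.floordiv 10 (2 ^ n) = 0 := by
  have h2 : (16 : Int) ≤ 2 ^ n := by
    calc (16 : Int) = 2 ^ 4 := by norm_num
    _ ≤ 2 ^ n := by exact pow_le_pow_right₀ (by norm_num) hn
  have hpos : (0 : Int) < 2 ^ n := by positivity
  rw [PySem.Int.floordiv_eq_ediv_of_pos hpos]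
  exact Int.ediv_eq_zero_of_lt (by norm_num) (by omega)

theorem pv_main (h : Int) :
    pvLoopA h.toNat 10 =
      (if h ≤ 0 then (10 : Int) else PySem.Int.floordiv 10 (2 ^ h.toNat)) := by
  by_cases hle : h ≤ 0
  · simp [hle, Int.toNat_of_nonpos hle, pvLoopA]
  · simp only [hle, if_false]
    rcases Nat.lt_or_ge h.toNat 4 with h4 | h4
    · have h1 : 1 ≤ h.toNat := by omega
      interval_cases hn : h.toNat <;> decide
    · obtain ⟨m, hm⟩ := Nat.exists_eq_add_of_le h4
      rw [hm, Nat.add_comm, pvLoopA_add_four, pv_div_big _ (by omega)]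

-- ===== VERDICT (by name: the statement is the Claim_ definition above) =====
theorem calculate_block_reward_spec : Claim_equal_calculate_block_reward := by
  intro bi _
  unfold Spec_calculate_block_reward calculate_block_reward calculate_block_reward_alt
  exact pv_main _
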